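-- pv_equiv track=rewrite | github.com/vimalthomas/codedescriptor | project_qa.py | search_chunks
-- ===== SOURCE A (Python) =====
-- def search_chunks(chunks, query):
--     scores = []
--     query = query.lower()
--
--     for idx, chunk in enumerate(chunks):
--         score = sum(query.count(word.lower()) for word in chunk.split())
--         scores.append((score, idx))
--
--     scores.sort(reverse=True)
--     best_idx = scores[0][1]
--     return chunks[best_idx]
-- ===== SOURCE B (Python) =====
-- def search_chunks(chunks, query):
--     q = query.lower()
--     best_score = None
--     best_idx = None
--     for idx, chunk in enumerate(chunks):
--         score = sum(q.count(word.lower()) for word in chunk.split())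
--         if best_score is None or score >= best_score:
--             best_score = score
--             best_idx = idx
--     return chunks[best_idx]
-- ===== Notes on version B (the rewrite author's own statement) =====
-- stated objective: simpler
-- what changed: Replaces the scores list plus reverse sort with a single pass keeping a running best (score, idx); updating on score >= best reproduces the sort's tie-break of highest score then highest index.
import Mathlib
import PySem

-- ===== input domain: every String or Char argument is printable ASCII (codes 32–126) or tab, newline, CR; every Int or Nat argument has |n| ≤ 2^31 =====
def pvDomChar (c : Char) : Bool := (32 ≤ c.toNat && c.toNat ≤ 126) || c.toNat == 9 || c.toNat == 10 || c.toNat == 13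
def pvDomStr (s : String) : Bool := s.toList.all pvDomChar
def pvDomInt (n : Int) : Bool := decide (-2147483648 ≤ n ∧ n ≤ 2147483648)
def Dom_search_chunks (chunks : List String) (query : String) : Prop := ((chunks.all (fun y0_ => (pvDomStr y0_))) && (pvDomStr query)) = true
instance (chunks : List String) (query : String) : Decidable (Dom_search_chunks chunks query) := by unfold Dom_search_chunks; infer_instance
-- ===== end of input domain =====

-- B replaces the scores list + reverse sort with one pass keeping a running best
-- (score, idx), updating on score >= best; objective: simpler.

-- ===== PORT A =====
def search_chunks (chunks : List String) (query : String) : String :=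
  let query := PySem.Str.lower query
  let scores : List (Int × Int) :=
    (PySem.List.enumerate chunks).foldl
      (fun acc p =>
        acc ++ [(((PySem.Str.split₀ p.2).map
                    (fun word => (PySem.Str.count query (PySem.Str.lower word) : Int))).sum, p.1)])
      []
  let sortedScores := PySem.List.sorted2 scores (fun p => p.1) (fun p => p.2) true
  let best_idx := (PySem.List.pyGetD sortedScores 0 (0, 0)).2
  PySem.List.pyGetD chunks best_idx ""

-- ===== PORT B =====
def search_chunks_alt (chunks : List String) (query : String) : String :=
  let q := PySem.Str.lower query
  let best : Option (Int × Int) :=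
    (PySem.List.enumerate chunks).foldl
      (fun acc p =>
        let score : Int :=
          ((PySem.Str.split₀ p.2).map
            (fun word => (PySem.Str.count q (PySem.Str.lower word) : Int))).sum
        match acc with
        | none => some (score, p.1)
        | some (bs, bi) => if score ≥ bs then some (score, p.1) else some (bs, bi))
      none
  match best with
  | some (_, bi) => PySem.List.pyGetD chunks bi ""
  | none => ""   -- unreachable under Pre_: Python B raises (chunks[None]) on empty chunks, as A does

-- ===== PRECONDITION & SPEC =====
-- Pre_ excludes exactly the empty chunk list, on which A raises IndexError (scores[0]).
def Pre_search_chunks (chunks : List String) (query : String) : Prop := chunks ≠ []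
instance (chunks : List String) (query : String) : Decidable (Pre_search_chunks chunks query) := by unfold Pre_search_chunks; infer_instance
def pvWitness_search_chunks : List String × String := (["cat dog", "cat"], "cat cat")

def Spec_search_chunks (chunks : List String) (query : String) (out : String) : Prop := out = search_chunks_alt chunks query
instance (chunks : List String) (query : String) (out : String) : Decidable (Spec_search_chunks chunks query out) := by unfold Spec_search_chunks; infer_instance

-- ===== CLAIM (what is proved, stated in full; the proofs are below) =====
def Claim_equal_search_chunks : Prop := ∀ (chunks : List String) (query : String), Dom_search_chunks chunks query → Pre_search_chunks chunks query → Spec_search_chunks chunks query (search_chunks chunks query)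

-- ===== LEMMAS AND PROOFS =====

-- the reverse-lex "before" relation used by sorted2 with reverse := true
def revBefore (a b : Int × Int) : Bool :=
  decide (b.1 < a.1) || (!decide (a.1 < b.1) && decide (b.2 < a.2))

-- the two running-best step functions (proof helpers)
def aStep (h : Option (Int × Int)) (x : Int × Int) : Option (Int × Int) :=
  some (match h with
        | none => x
        | some m => if revBefore x m then x else m)

def bStep (acc : Option (Int × Int)) (p : Int × Int) : Option (Int × Int) :=
  match acc with
  | none => some p
  | some m => if p.1 ≥ m.1 then some p else some m

theorem aStep_some (m x : Int × Int) : aStep (some m) x = some (if revBefore x m then x else m) := rfl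
theorem bStep_some (m p : Int × Int) : bStep (some m) p = if p.1 ≥ m.1 then some p else some m := rfl

theorem head?_insertBy (x : Int × Int) (acc : List (Int × Int)) :
    (PySem.List.insertBy revBefore x acc).head? =
      some (match acc.head? with
            | none => x
            | some m => if revBefore x m then x else m) := by
  cases acc with
  | nil => simp [PySem.List.insertBy]
  | cons h t =>
      simp only [PySem.List.insertBy, List.head?_cons]
      by_cases hb : revBefore x h = true
      · simp [hb]
      · simp [hb]

-- head of the insertBy fold evolves as a simple running-best fold
theorem head?_foldl_insertBy (s : List (Int × Int)) (acc : List (Int × Int)) :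
    (s.foldl (fun a x => PySem.List.insertBy revBefore x a) acc).head? =
      s.foldl aStep acc.head? := by
  induction s generalizing acc with
  | nil => rfl
  | cons x t ih =>
      simp only [List.foldl_cons]
      rw [ih, head?_insertBy]
      rfl

theorem revBefore_of_lt (x m : Int × Int) (hm : m.2 < x.2) :
    revBefore x m = decide (x.1 ≥ m.1) := by
  simp only [revBefore, ge_iff_le]
  by_cases h1 : m.1 < x.1
  · simp [h1, le_of_lt h1]
  · by_cases h2 : x.1 < m.1
    · simp [h1, h2, not_le.mpr h2]
    · have : m.1 ≤ x.1 := le_of_not_gt h2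
      simp [h1, h2, hm, this]

-- under the invariant that the current best's index is below every remaining index,
-- the reverse-lex running best equals B's "score ≥ best" running best
theorem runningBest_eq (s : List (Int × Int))
    (hpw : s.Pairwise (fun a b => a.2 < b.2)) :
    ∀ (m0 : Option (Int × Int)), (∀ m, m0 = some m → ∀ x ∈ s, m.2 < x.2) →
    s.foldl aStep m0 = s.foldl bStep m0 := by
  induction s with
  | nil => intro m0 _; rfl
  | cons x t ih =>
      intro m0 hinv
      have hpw' := (List.pairwise_cons.mp hpw).2
      have hxlt := (List.pairwise_cons.mp hpw).1
      simp only [List.foldl_cons]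
      cases m0 with
      | none =>
          show t.foldl aStep (some x) = t.foldl bStep (some x)
          exact ih hpw' (some x) (by intro m' hme y hy; injection hme with e; subst e; exact hxlt y hy)
      | some m =>
          have hm : m.2 < x.2 := hinv m rfl x (by simp)
          rw [aStep_some, bStep_some, revBefore_of_lt x m hm]
          by_cases h : x.1 ≥ m.1
          · simp only [h, decide_true, if_true]
            exact ih hpw' (some x) (by intro m' hme y hy; injection hme with e; subst e; exact hxlt y hy)
          · simp only [h, decide_false, if_false]
            exact ih hpw' (some m)
              (by intro m' hme y hy; injection hme with e; subst e; exact lt_trans hm (hxlt y hy))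

theorem search_chunks_spec : Claim_equal_search_chunks := by
  intro chunks query _ hpre
  unfold Spec_search_chunks search_chunks search_chunks_alt
  simp only [PySem.List.foldl_append_singleton_eq_map, List.nil_append]
  set q := PySem.Str.lower query with hq
  set f : Int × String → Int × Int := fun p =>
    (((PySem.Str.split₀ p.2).map
        (fun word => (PySem.Str.count q (PySem.Str.lower word) : Int))).sum, p.1) with hf
  set scores := (PySem.List.enumerate chunks).map f with hscores
  -- B's fold over enumerate is the running-best fold over scores
  have hB :
      (PySem.List.enumerate chunks).foldl
        (fun acc p =>
          let score : Int :=
            ((PySem.Str.split₀ p.2).map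
              (fun word => (PySem.Str.count q (PySem.Str.lower word) : Int))).sum
          match acc with
          | none => some (score, p.1)
          | some (bs, bi) => if score ≥ bs then some (score, p.1) else some (bs, bi))
        none =
      scores.foldl bStep none := by
    rw [hscores, List.foldl_map]
    apply PySem.List.foldl_congr_mem
    intro acc p _
    cases acc with
    | none => rfl
    | some m => cases m; rfl
  -- A's sorted head is the reverse-lex running best over scores
  have hA :
      (PySem.List.sorted2 scores (fun p => p.1) (fun p => p.2) true).head? =
      scores.foldl aStep none := by
    have : PySem.List.sorted2 scores (fun p => p.1) (fun p => p.2) true =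
        scores.foldl (fun a x => PySem.List.insertBy revBefore x a) [] := by
      simp only [PySem.List.sorted2]
      rfl
    rw [this, head?_foldl_insertBy]
    rfl
  have hpw : scores.Pairwise (fun a b => a.2 < b.2) := by
    rw [hscores, List.pairwise_map]
    exact (PySem.List.pairwise_lt_enumerate chunks 0).imp (fun h => by simpa [hf] using h)
  have hmain := runningBest_eq scores hpw none (by intro m hm; cases hm)
  -- scores is nonempty
  have hsne : scores ≠ [] := by
    rw [hscores]
    simp only [ne_eq, List.map_eq_nil_iff]
    intro h
    exact hpre (by
      have := congrArg List.length h
      simpa [PySem.List.length_enumerate] using (List.length_eq_zero_iff.mp (by simpa [PySem.List.length_enumerate] using this)))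
  have hfold_ne :
      ∀ (s : List (Int × Int)) (m0 : Option (Int × Int)), s ≠ [] →
        ∃ r, s.foldl aStep m0 = some r := by
    intro s
    induction s with
    | nil => intro _ h; exact absurd rfl h
    | cons x t ih =>
        intro m0 _
        simp only [List.foldl_cons]
        by_cases ht : t = []
        · subst ht; exact ⟨_, rfl⟩
        · exact ih _ ht
  rw [hB, ← hmain]
  obtain ⟨r, hr⟩ := hfold_ne scores none hsne
  have hhead : (PySem.List.sorted2 scores (fun p => p.1) (fun p => p.2) true).head? = some r := by
    rw [hA, hr]
  rw [hr]
  obtain ⟨rs, ri⟩ := r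
  cases hsort : PySem.List.sorted2 scores (fun p => p.1) (fun p => p.2) true with
  | nil => rw [hsort] at hhead; simp at hhead
  | cons hd tl =>
      rw [hsort] at hhead
      simp only [List.head?_cons, Option.some.injEq] at hhead
      rw [hhead]
      simp only [PySem.List.pyGetD_zero_cons]
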